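-- pv_equiv track=rewrite | github.com/saud-techweer/nfx-scraper | scrape_saas_profiles.py | is_garbage_name
-- ===== SOURCE A (Python) =====
-- def is_garbage_name(name):
--     if not name:
--         return True
--     name_lower = name.strip().lower()
--     # Must be real text, not whitespace/zero-width chars
--     clean = ''.join(c for c in name_lower if c.isprintable() and not c.isspace())
--     if len(clean) < 2:
--         return True
--     garbage = [
--         "signal.nfx.com", "nfx signal", "bad gateway", "bad request",
--         "error code", "not found", "forbidden", "server error",
--         "service unavailable", "access denied", "this page",
--         "isn't working", "not available", "timed out",
--         "too many requests", "cloudflare", "press space", "to play",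
--         "loading", "just a moment", "please wait", "captcha",
--         "verify you", "checking your browser", "error",
--     ]
--     for g in garbage:
--         if g in name_lower:
--             return True
--     if name_lower.startswith(("400", "401", "403", "404", "429", "500", "502", "503")):
--         return True
--     return False
-- ===== SOURCE B (Python) =====
-- _GARBAGE = [
--     "signal.nfx.com", "nfx signal", "bad gateway", "bad request",
--     "error code", "not found", "forbidden", "server error",
--     "service unavailable", "access denied", "this page",
--     "isn't working", "not available", "timed out",
--     "too many requests", "cloudflare", "press space", "to play",
--     "loading", "just a moment", "please wait", "captcha",
--     "verify you", "checking your browser", "error",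
-- ]
-- # index the blacklist by first character once, at module load
-- _BY_FIRST = {}
-- for _g in _GARBAGE:
--     _BY_FIRST.setdefault(_g[0], []).append(_g)
-- _CODES = ("400", "401", "403", "404", "429", "500", "502", "503")
--
--
-- def is_garbage_name(name):
--     if not name:
--         return True
--     name_lower = name.strip().lower()
--     clean = ''.join(c for c in name_lower if c.isprintable() and not c.isspace())
--     if len(clean) < 2:
--         return True
--     if name_lower[:3] in _CODES:
--         return True
--     # one left-to-right scan: at each position try only the entries that start with that character
--     for i, c in enumerate(name_lower):
--         for g in _BY_FIRST.get(c, []):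
--             if name_lower.startswith(g, i):
--                 return True
--     return False
-- ===== Notes on version B (the rewrite author's own statement) =====
-- stated objective: alternative
-- what changed: Replaces the per-pattern substring scans and the startswith tuple by a single left-to-right scan of the string driven by a first-character index (dict) of the blacklist built once at module load, with the numeric codes checked via slice membership name_lower[:3] in a tuple.
import Mathlib
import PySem

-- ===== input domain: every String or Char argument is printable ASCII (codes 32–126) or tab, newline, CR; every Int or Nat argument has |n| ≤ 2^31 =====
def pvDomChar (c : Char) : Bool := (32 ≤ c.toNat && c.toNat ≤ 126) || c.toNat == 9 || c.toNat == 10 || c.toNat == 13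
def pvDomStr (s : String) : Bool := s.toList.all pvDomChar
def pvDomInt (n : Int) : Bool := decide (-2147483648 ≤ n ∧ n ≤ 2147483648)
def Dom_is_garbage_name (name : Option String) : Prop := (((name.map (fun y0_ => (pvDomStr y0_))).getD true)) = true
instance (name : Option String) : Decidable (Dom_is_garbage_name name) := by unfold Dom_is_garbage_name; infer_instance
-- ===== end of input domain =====

-- B replaces the per-pattern substring scans (+ startswith tuple) by one left-to-right scan of the
-- string using a first-character index of the blacklist, and a slice-membership test for the codes
-- (objective: alternative algorithm, same guards, same return value).

-- ===== PORT A =====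
def pvGarbage : List String := [
  "signal.nfx.com", "nfx signal", "bad gateway", "bad request",
  "error code", "not found", "forbidden", "server error",
  "service unavailable", "access denied", "this page",
  "isn't working", "not available", "timed out",
  "too many requests", "cloudflare", "press space", "to play",
  "loading", "just a moment", "please wait", "captcha",
  "verify you", "checking your browser", "error"]

def pvCodes : List String := ["400", "401", "403", "404", "429", "500", "502", "503"]

-- c.isprintable(): exact on the stated domain (printable ASCII 32–126 is printable; tab/newline/CR are not)
def pvIsPrintable (c : Char) : Bool := 32 ≤ c.toNat && c.toNat ≤ 126

def is_garbage_name (name : Option String) : Bool :=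
  match name with
  | none => true                           -- 'if not name' (None)
  | some s =>
    if s.toList.isEmpty then true          -- 'if not name' (empty string)
    else
      let nl := PySem.Chars.lower (PySem.Chars.strip s.toList)
      let clean := nl.filter (fun c => pvIsPrintable c && !PySem.Chars.isspace c)
      if clean.length < 2 then true
      else if pvGarbage.any (fun g => PySem.Chars.isIn g.toList nl) then true     -- for g in garbage: if g in name_lower
      else if pvCodes.any (fun p => PySem.Chars.startswith nl p.toList) then true -- startswith(tuple)
      else false

-- ===== PORT B =====
-- _BY_FIRST: for g in _GARBAGE: _BY_FIRST.setdefault(g[0], []).append(g)   (every entry is nonempty, so g[0] = headD)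
def pvByFirst : PySem.Dict Char (List String) :=
  pvGarbage.foldl (fun d g => d.modify (g.toList.headD ' ') [] (fun l => l ++ [g])) PySem.Dict.empty

def is_garbage_name_alt (name : Option String) : Bool :=
  match name with
  | none => true
  | some s =>
    if s.toList.isEmpty then true
    else
      let nl := PySem.Chars.lower (PySem.Chars.strip s.toList)
      let clean := nl.filter (fun c => pvIsPrintable c && !PySem.Chars.isspace c)
      if clean.length < 2 then true
      else if pvCodes.any (fun cstr => PySem.List.slice nl none (some 3) == cstr.toList) then true  -- name_lower[:3] in _CODES
      else if (PySem.List.enumerate nl 0).any (fun p =>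
          (pvByFirst.getD p.2 []).any (fun g => PySem.Chars.startswith (nl.drop p.1.toNat) g.toList)) then true
          -- for i, c in enumerate(name_lower): for g in _BY_FIRST.get(c, []): if name_lower.startswith(g, i)
      else false

-- ===== PRECONDITION & SPEC =====
def Spec_is_garbage_name (name : Option String) (out : Bool) : Prop := out = is_garbage_name_alt name
instance (name : Option String) (out : Bool) : Decidable (Spec_is_garbage_name name out) := by unfold Spec_is_garbage_name; infer_instance

-- ===== CLAIM (what is proved, stated in full; the proofs are below) =====
def Claim_equal_is_garbage_name : Prop := ∀ (name : Option String), Dom_is_garbage_name name → Spec_is_garbage_name name (is_garbage_name name)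

-- ===== LEMMAS AND PROOFS =====

lemma pvByFirst_getD (c : Char) :
    pvByFirst.getD c [] = pvGarbage.filter (fun g => g.toList.headD ' ' == c) := by
  have h : pvByFirst = (pvGarbage.map (fun g => (g.toList.headD ' ', g))).foldl
      (fun d p => d.modify p.1 [] (fun l => l ++ [p.2])) PySem.Dict.empty := by
    rw [List.foldl_map]; rfl
  rw [h, PySem.Dict.getD_foldl_modify_append, List.filter_map, List.map_map]
  simp [Function.comp_def]

lemma pvGarbage_nonempty : ∀ g ∈ pvGarbage, g.toList ≠ [] := by decide

lemma pvScan_eq (nl : List Char) :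
    ((PySem.List.enumerate nl 0).any (fun p =>
        (pvByFirst.getD p.2 []).any (fun g => PySem.Chars.startswith (nl.drop p.1.toNat) g.toList)))
    = pvGarbage.any (fun g => PySem.Chars.isIn g.toList nl) := by
  apply Bool.eq_iff_iff.mpr
  simp only [List.any_eq_true, pvByFirst_getD, List.mem_filter, PySem.List.mem_enumerate_iff,
    PySem.Chars.startswith_iff]
  constructor
  · rintro ⟨p, ⟨k, hk, rfl⟩, g, ⟨hg, -⟩, hpre⟩
    refine ⟨g, hg, (PySem.Chars.exists_prefix_drop_iff_isIn g.toList nl).mp ⟨k, ?_⟩⟩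
    simpa using hpre
  · rintro ⟨g, hg, hin⟩
    obtain ⟨j, hpre⟩ := (PySem.Chars.exists_prefix_drop_iff_isIn g.toList nl).mpr hin
    obtain ⟨r, hr⟩ := hpre
    have hgl := pvGarbage_nonempty g hg
    obtain ⟨c0, t, hgt⟩ := List.exists_cons_of_ne_nil hgl
    have hdropne : nl.drop j ≠ [] := by
      rw [← hr, hgt]; simp
    have h0 : nl[j]? = some c0 := by
      rw [← List.head?_drop, ← hr, hgt]; rfl
    have hj : j < nl.length := (List.getElem?_eq_some_iff.mp h0).1
    have hhead : nl[j] = c0 := by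
      rw [List.getElem?_eq_getElem hj] at h0
      exact Option.some.inj h0
    refine ⟨((0 : Int) + (j : Int), nl[j]), ⟨j, hj, rfl⟩, g, ⟨hg, ?_⟩, ?_⟩
    · rw [hhead, hgt]; simp
    · simpa using ⟨r, hr⟩
  
lemma pvCodes_eq (nl : List Char) :
    (pvCodes.any (fun cstr => PySem.List.slice nl none (some 3) == cstr.toList))
    = pvCodes.any (fun p => PySem.Chars.startswith nl p.toList) := by
  apply PySem.List.any_congr_mem
  intro x hx
  have h3 : x.toList.length = 3 := by fin_cases hx <;> decide
  rw [PySem.List.slice_to nl (by norm_num)]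
  apply Bool.eq_iff_iff.mpr
  rw [beq_iff_eq, PySem.Chars.startswith_iff, List.prefix_iff_eq_take, h3]
  exact ⟨fun h => h.symm, fun h => h.symm⟩

lemma pvIteOr (a b : Bool) : (if a then true else if b then true else false) = (a || b) := by
  cases a <;> cases b <;> rfl

-- ===== VERDICT (by name: the statement is the Claim_ definition above) =====
theorem is_garbage_name_spec : Claim_equal_is_garbage_name := by
  intro name _
  unfold Spec_is_garbage_name is_garbage_name is_garbage_name_alt
  cases name with
  | none => rfl
  | some s =>
    simp only []
    by_cases he : s.toList.isEmpty
    · simp [he]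
    · simp only [he]
      set nl := PySem.Chars.lower (PySem.Chars.strip s.toList) with hnl
      by_cases hc : (nl.filter (fun c => pvIsPrintable c && !PySem.Chars.isspace c)).length < 2
      · simp [hc]
      · simp only [hc, if_false]
        rw [pvScan_eq nl, pvCodes_eq nl, pvIteOr, pvIteOr, Bool.or_comm]
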